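-- pv_equiv track=rewrite | github.com/Vodka-Bu/ML_tools | classification/knn.py | argsort_part
-- ===== SOURCE A (Python) =====
-- def argsort_part(distances, k):
--     '''
--     部分排序，并返回相应index
--     :param distances: 距离
--     :param k: 停止轮数
--     :return: 长度为k的一个list
--     '''
--     distinces_copy = distances.copy()
--     max_dist = max(distinces_copy)
--
--     arg_list = []
--     for i in range(k):
--         temp_min_value = max_dist
--         temp_min_index = -1
--         for index, value in enumerate(distinces_copy):
--             if value <= temp_min_value:
--                 temp_min_value = value
--                 temp_min_index = index
--         arg_list.append(temp_min_index)
--         distinces_copy[temp_min_index] = max_dist + 1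
--     return arg_list
-- ===== SOURCE B (Python) =====
-- def argsort_part(distances, k):
--     # one-shot sort of the index table: value ascending, index descending (ties go to the last index)
--     order = sorted(range(len(distances)), key=lambda i: (distances[i], -i))
--     return [order[i] if i < len(order) else -1 for i in range(k)]
-- ===== Notes on version B (the rewrite author's own statement) =====
-- stated objective: faster
-- what changed: A's k selection passes (each a full min-scan over a mutated copy, ties to the last index) are replaced by one sort of the index table keyed (value ascending, index descending), from which the answer is read off; -1 padding for k > len falls out of the same read-off.
import Mathlib
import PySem

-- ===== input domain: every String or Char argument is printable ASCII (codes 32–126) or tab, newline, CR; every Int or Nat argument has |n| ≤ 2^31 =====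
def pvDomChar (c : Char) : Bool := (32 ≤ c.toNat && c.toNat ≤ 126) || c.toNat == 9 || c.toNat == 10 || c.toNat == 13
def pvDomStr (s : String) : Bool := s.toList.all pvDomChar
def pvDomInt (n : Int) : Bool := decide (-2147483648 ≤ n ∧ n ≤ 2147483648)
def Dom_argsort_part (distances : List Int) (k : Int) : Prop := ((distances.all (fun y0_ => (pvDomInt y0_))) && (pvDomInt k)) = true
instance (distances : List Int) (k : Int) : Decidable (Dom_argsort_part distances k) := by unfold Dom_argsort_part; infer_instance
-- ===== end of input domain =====

-- B replaces A's k repeated min-scans over a mutated copy by ONE sort of the index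
-- table keyed (value asc, index desc); equivalence on nonempty input is proved below.


-- ===== PORT A =====
def argsort_part (distances : List Int) (k : Int) : List Int :=
  match PySem.List.max? distances (fun y => y) with
  | none => []   -- max() on an empty list raises ValueError; excluded by Pre_
  | some maxDist =>
    ((PySem.List.pyRange 0 k 1).foldl
      (fun st _ =>
        let r := (PySem.List.enumerate st.1 0).foldl
          (fun s p => if p.2 ≤ s.1 then (p.2, p.1) else s) (maxDist, -1)
        (PySem.List.pySetD st.1 r.2 (maxDist + 1), st.2 ++ [r.2]))
      (distances, ([] : List Int))).2

-- ===== PORT B =====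
-- the key 'toLex (distances[i], -i)' is exactly Python's lexicographic tuple key (distances[i], -i)
def argsort_part_alt (distances : List Int) (k : Int) : List Int :=
  let order := PySem.List.sorted (PySem.List.pyRange 0 (distances.length : Int) 1)
      (fun i => (toLex (PySem.List.pyGetD distances i 0, -i) : Lex (Int × Int)))
  (PySem.List.pyRange 0 k 1).map
    (fun i => if i < (order.length : Int) then PySem.List.pyGetD order i (-1) else -1)

-- ===== PRECONDITION & SPEC =====
-- Pre_ excludes only the empty list, on which A's max() raises ValueError.
def Pre_argsort_part (distances : List Int) (k : Int) : Prop := distances ≠ []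
instance (distances : List Int) (k : Int) : Decidable (Pre_argsort_part distances k) := by unfold Pre_argsort_part; infer_instance
def pvWitness_argsort_part : List Int × Int := ([3, 1, 2, 1], 3)

def Spec_argsort_part (distances : List Int) (k : Int) (out : List Int) : Prop := out = argsort_part_alt distances k
instance (distances : List Int) (k : Int) (out : List Int) : Decidable (Spec_argsort_part distances k out) := by unfold Spec_argsort_part; infer_instance

-- ===== CLAIM (what is proved, stated in full; the proofs are below) =====
def Claim_equal_argsort_part : Prop := ∀ (distances : List Int) (k : Int), Dom_argsort_part distances k → Pre_argsort_part distances k → Spec_argsort_part distances k (argsort_part distances k)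

-- ===== LEMMAS AND PROOFS =====

def selOrder (d : List Int) : List Int :=
  PySem.List.sorted (PySem.List.pyRange 0 (d.length : Int) 1)
    (fun i => (toLex (PySem.List.pyGetD d i 0, -i) : Lex (Int × Int)))

def maskVal (d : List Int) (M : Int) (S : List Int) (j : Nat) : Int :=
  if (j : Int) ∈ S then M + 1 else d.getD j 0

def maskList (d : List Int) (M : Int) (S : List Int) : List Int :=
  (List.range d.length).map (maskVal d M S)

theorem selOrder_length (d : List Int) : (selOrder d).length = d.length := by
  simp [selOrder, PySem.List.length_sorted, PySem.List.length_pyRange_one]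

theorem selOrder_perm (d : List Int) :
    (selOrder d).Perm (PySem.List.pyRange 0 (d.length : Int) 1) :=
  PySem.List.sorted_perm _ _ _

theorem selOrder_mem (d : List Int) : ∀ x ∈ selOrder d, 0 ≤ x ∧ x < (d.length : Int) :=
  fun x hx => PySem.List.mem_pyRange_one.mp ((selOrder_perm d).subset hx)

theorem selOrder_nodup (d : List Int) : (selOrder d).Nodup :=
  ((selOrder_perm d).nodup_iff).mpr (PySem.List.nodup_pyRange_one 0 _)

theorem selOrder_pairwise (d : List Int) :
    (selOrder d).Pairwise (fun a b =>
      (toLex (PySem.List.pyGetD d a 0, -a) : Lex (Int × Int)) ≤ toLex (PySem.List.pyGetD d b 0, -b)) :=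
  PySem.List.sorted_pairwise _ _

theorem mask_nil (d : List Int) (M : Int) : maskList d M [] = d := by
  apply List.ext_getElem
  · simp [maskList]
  · intro i h1 h2
    simp [maskList, maskVal, List.getElem?_eq_getElem, h2]

theorem length_maskList (d : List Int) (M : Int) (S : List Int) :
    (maskList d M S).length = d.length := by simp [maskList]

theorem getElem_maskList (d : List Int) (M : Int) (S : List Int) (i : Nat)
    (h : i < (maskList d M S).length) : (maskList d M S)[i] = maskVal d M S i := by
  simp [maskList]

theorem enum_eq (xs : List Int) (s : Int) :
    PySem.List.enumerate xs s = (List.range xs.length).map (fun j : Nat => (s + (j : Int), xs.getD j 0)) := by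
  induction xs generalizing s with
  | nil => simp [PySem.List.enumerate_nil]
  | cons x xs ih =>
      rw [PySem.List.enumerate_cons, ih]
      simp [List.range_succ_eq_map, Function.comp]
      intro a _
      ring

theorem scan_inv (val : Nat → Int) (M : Int) (t : Nat) :
    ((∀ j, j < t → M < val j) ∧
      (List.range t).foldl (fun acc j => if val j ≤ acc.1 then (val j, (j : Int)) else acc) (M, -1) = (M, -1)) ∨
    (∃ b, b < t ∧ val b ≤ M ∧
      (List.range t).foldl (fun acc j => if val j ≤ acc.1 then (val j, (j : Int)) else acc) (M, -1) = (val b, (b : Int)) ∧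
      ∀ j, j < t → val j ≤ M → (val b ≤ val j ∧ (val j ≤ val b → j ≤ b))) := by
  induction t with
  | zero => left; exact ⟨fun j h => absurd h (Nat.not_lt_zero j), rfl⟩
  | succ t ih =>
      rw [List.range_succ, List.foldl_append]
      rcases ih with ⟨hall, heq⟩ | ⟨b, hbt, hbM, heq, hmin⟩
      · rw [heq]
        by_cases h : val t ≤ M
        · right
          refine ⟨t, Nat.lt_succ_self t, h, by simp [h], ?_⟩
          intro j hj hjM
          rcases Nat.lt_succ_iff_lt_or_eq.mp hj with hj' | rfl
          · exact absurd hjM (not_le.mpr (hall j hj'))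
          · exact ⟨le_refl _, fun _ => le_refl _⟩
        · left
          refine ⟨?_, by simp [h]⟩
          intro j hj
          rcases Nat.lt_succ_iff_lt_or_eq.mp hj with hj' | rfl
          · exact hall j hj'
          · exact not_le.mp h
      · rw [heq]
        by_cases h : val t ≤ val b
        · right
          refine ⟨t, Nat.lt_succ_self t, le_trans h hbM, by simp [h], ?_⟩
          intro j hj hjM
          rcases Nat.lt_succ_iff_lt_or_eq.mp hj with hj' | rfl
          · exact ⟨le_trans h (hmin j hj' hjM).1, fun _ => Nat.le_of_lt_succ (Nat.lt_succ_of_lt hj')⟩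
          · exact ⟨le_refl _, fun _ => le_refl _⟩
        · right
          refine ⟨b, Nat.lt_succ_of_lt hbt, hbM, by simp [h], ?_⟩
          intro j hj hjM
          rcases Nat.lt_succ_iff_lt_or_eq.mp hj with hj' | rfl
          · exact hmin j hj' hjM
          · exact ⟨le_of_not_ge h, fun hc => absurd hc (not_le.mpr (not_le.mp h))⟩

theorem scan_on_mask (d : List Int) (M : Int) (S : List Int) :
    (PySem.List.enumerate (maskList d M S) 0).foldl
        (fun s p => if p.2 ≤ s.1 then (p.2, p.1) else s) (M, -1)
      = (List.range d.length).foldl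
        (fun acc j => if maskVal d M S j ≤ acc.1 then (maskVal d M S j, (j : Int)) else acc) (M, -1) := by
  rw [enum_eq, List.foldl_map, length_maskList]
  apply PySem.List.foldl_congr_mem
  intro acc j hj
  have hjn : j < d.length := List.mem_range.mp hj
  have hg : (maskList d M S).getD j 0 = maskVal d M S j := by
    rw [List.getD_eq_getElem _ _ (by simpa [length_maskList] using hjn)]
    exact getElem_maskList d M S j _
  dsimp only
  rw [hg, zero_add]

theorem getD_not_mem_take (l : List Int) (hl : l.Nodup) (m : Nat) (hm : m < l.length) :
    l.getD m 0 ∉ l.take m := by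
  intro hmem
  obtain ⟨q, hq, hqe⟩ := List.mem_iff_getElem.mp hmem
  have hqm : q < m := by rw [List.length_take] at hq; omega
  rw [List.getElem_take, List.getD_eq_getElem _ _ hm] at hqe
  have := (List.Nodup.getElem_inj_iff hl).mp hqe
  omega

theorem round_lt (d : List Int) (M : Int) (hM : ∀ y ∈ d, y ≤ M) (m : Nat) (hm : m < d.length) :
    (List.range d.length).foldl
      (fun acc j => if maskVal d M ((selOrder d).take m) j ≤ acc.1
        then (maskVal d M ((selOrder d).take m) j, (j : Int)) else acc) (M, -1)
    = (d.getD ((selOrder d).getD m 0).toNat 0, (selOrder d).getD m 0) := by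
  have hOlen : (selOrder d).length = d.length := selOrder_length d
  have hmO : m < (selOrder d).length := by omega
  set O := selOrder d with hO
  set jI := O.getD m 0 with hjI
  have hjImem : jI ∈ O := by
    rw [hjI, List.getD_eq_getElem _ _ hmO]; exact List.getElem_mem _
  obtain ⟨hjI0, hjIn⟩ := selOrder_mem d jI hjImem
  set jN := jI.toNat with hjN
  have hcast : (jN : Int) = jI := Int.toNat_of_nonneg hjI0
  have hjNlt : jN < d.length := by omega
  have hnotmem : jI ∉ O.take m := getD_not_mem_take O (selOrder_nodup d) m hmO
  have hvaljN : maskVal d M (O.take m) jN = d.getD jN 0 := by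
    simp [maskVal, hcast, hnotmem]
  have hgetmem : d.getD jN 0 ∈ d := by
    rw [List.getD_eq_getElem _ _ hjNlt]; exact List.getElem_mem _
  have hjNM : maskVal d M (O.take m) jN ≤ M := by rw [hvaljN]; exact hM _ hgetmem
  -- minimality of jN among live entries
  have hP : ∀ j, j < d.length → maskVal d M (O.take m) j ≤ M →
      (maskVal d M (O.take m) jN ≤ maskVal d M (O.take m) j ∧
        (maskVal d M (O.take m) j ≤ maskVal d M (O.take m) jN → j ≤ jN)) := by
    intro j hj hjlive
    by_cases hmask : (j : Int) ∈ O.take m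
    · rw [maskVal, if_pos hmask] at hjlive; omega
    · have hval : maskVal d M (O.take m) j = d.getD j 0 := by simp [maskVal, hmask]
      have hjO : (j : Int) ∈ O := (selOrder_perm d).mem_iff.mpr
        (PySem.List.mem_pyRange_one.mpr ⟨Int.natCast_nonneg j, by exact_mod_cast hj⟩)
      obtain ⟨q, hqlt, hqeq⟩ := List.mem_iff_getElem.mp hjO
      have hqge : m ≤ q := by
        by_contra hlt
        push_neg at hlt
        apply hmask
        have hq' : q < (O.take m).length := by simp [List.length_take]; omega
        have : (O.take m)[q]'hq' = (j : Int) := by rw [List.getElem_take]; exact hqeq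
        exact this ▸ List.getElem_mem _
      rcases eq_or_lt_of_le hqge with rfl | hqgt
      · have hjeq : (j : Int) = jI := by
          rw [hjI, List.getD_eq_getElem _ _ hmO, hqeq]
        have : j = jN := by omega
        subst this
        exact ⟨le_refl _, fun _ => le_refl _⟩
      · have hpw := (List.pairwise_iff_getElem.mp (selOrder_pairwise d)) m q hmO hqlt hqgt
        rw [Prod.Lex.toLex_le_toLex] at hpw
        have hOm : O[m]'hmO = (jN : Int) := by
          rw [hcast, hjI, List.getD_eq_getElem _ _ hmO]
        rw [hOm, hqeq] at hpw
        simp only [PySem.List.pyGetD_natCast] at hpw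
        rw [hval, hvaljN]
        rcases hpw with h | ⟨h1, h2⟩
        · exact ⟨le_of_lt h, fun hle => absurd hle (not_le.mpr h)⟩
        · exact ⟨le_of_eq h1, fun _ => by omega⟩
  rcases scan_inv (maskVal d M (O.take m)) M d.length with ⟨hall, heq⟩ | ⟨b, hb, hbM, heq, hmin⟩
  · exact absurd hjNM (not_le.mpr (hall jN hjNlt))
  · have h1 := hP b hb hbM
    have h2 := hmin jN hjNlt hjNM
    have hbeq : b = jN := le_antisymm (h1.2 h2.1) (h2.2 h1.1)
    rw [heq, hbeq, hvaljN, hcast]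

theorem round_ge (d : List Int) (M : Int) (m : Nat) (hm : d.length ≤ m) :
    (List.range d.length).foldl
      (fun acc j => if maskVal d M ((selOrder d).take m) j ≤ acc.1
        then (maskVal d M ((selOrder d).take m) j, (j : Int)) else acc) (M, -1)
    = (M, -1) := by
  rcases scan_inv (maskVal d M ((selOrder d).take m)) M d.length with ⟨_, heq⟩ | ⟨b, hb, hbM, _, _⟩
  · exact heq
  · exfalso
    have hbO : (b : Int) ∈ (selOrder d).take m := by
      rw [List.take_of_length_le (by rw [selOrder_length]; omega)]
      exact (selOrder_perm d).mem_iff.mpr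
        (PySem.List.mem_pyRange_one.mpr ⟨Int.natCast_nonneg b, by exact_mod_cast hb⟩)
    rw [maskVal, if_pos hbO] at hbM
    omega

theorem copy_update_lt (d : List Int) (M : Int) (m : Nat) (hm : m < d.length) :
    PySem.List.pySetD (maskList d M ((selOrder d).take m)) ((selOrder d).getD m 0) (M + 1)
      = maskList d M ((selOrder d).take (m + 1)) := by
  have hOlen : (selOrder d).length = d.length := selOrder_length d
  have hmO : m < (selOrder d).length := by omega
  set O := selOrder d with hO
  set jI := O.getD m 0 with hjI
  have hjImem : jI ∈ O := by
    rw [hjI, List.getD_eq_getElem _ _ hmO]; exact List.getElem_mem _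
  obtain ⟨hjI0, hjIn⟩ := selOrder_mem d jI hjImem
  have hcast : (jI.toNat : Int) = jI := Int.toNat_of_nonneg hjI0
  have htake : O.take (m + 1) = O.take m ++ [jI] := by
    rw [List.take_add_one, List.getElem?_eq_getElem hmO]
    simp [hjI, List.getElem?_eq_getElem hmO]
  rw [PySem.List.pySetD_of_nonneg _ _ hjI0]
  apply List.ext_getElem
  · simp [maskList]
  · intro i h1 h2
    have hi : i < d.length := by simpa [length_maskList] using h2
    rw [List.getElem_set, getElem_maskList]
    split_ifs with hij
    · have himem : (i : Int) ∈ O.take (m + 1) := by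
        rw [htake]
        have : (i : Int) = jI := by omega
        simp [this]
      rw [getElem_maskList]
      simp [maskVal, himem]
    · rw [getElem_maskList]
      have hine : (i : Int) ≠ jI := by omega
      simp [maskVal, htake, hine]

theorem pySetD_neg_one (xs : List Int) (v : Int) (h : xs ≠ []) :
    PySem.List.pySetD xs (-1) v = xs.set (xs.length - 1) v := by
  have h1 : (0 : Nat) < xs.length := List.length_pos_iff.mpr h
  simp [PySem.List.pySetD, PySem.List.pySet?, PySem.List.pyIdx?]
  rw [if_pos (show 1 ≤ xs.length by omega)]
  rfl

theorem copy_update_ge (d : List Int) (M : Int) (hd : d ≠ []) :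
    PySem.List.pySetD (maskList d M (selOrder d)) (-1) (M + 1)
      = maskList d M (selOrder d) := by
  have hne : maskList d M (selOrder d) ≠ [] := by
    intro hc
    have := congrArg List.length hc
    rw [length_maskList] at this
    exact hd (List.length_eq_zero_iff.mp this)
  rw [pySetD_neg_one _ _ hne]
  apply List.ext_getElem
  · simp
  · intro i h1 h2
    rw [List.getElem_set]
    split_ifs with hie
    · have hi : i < d.length := by simpa [length_maskList] using h2
      rw [getElem_maskList, maskVal, if_pos ?_]
      exact (selOrder_perm d).mem_iff.mpr
        (PySem.List.mem_pyRange_one.mpr ⟨Int.natCast_nonneg i, by exact_mod_cast hi⟩)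
    · rfl

theorem loop_inv (d : List Int) (M : Int) (hd : d ≠ [])
    (hM : ∀ y ∈ d, y ≤ M) (m : Nat) :
    (PySem.List.pyRange 0 (m : Int) 1).foldl
      (fun st _ =>
        let r := (PySem.List.enumerate st.1 0).foldl
          (fun s p => if p.2 ≤ s.1 then (p.2, p.1) else s) (M, -1)
        (PySem.List.pySetD st.1 r.2 (M + 1), st.2 ++ [r.2]))
      (d, ([] : List Int)) =
    (maskList d M ((selOrder d).take m),
      (selOrder d).take m ++ List.replicate (m - d.length) (-1)) := by
  induction m with
  | zero =>
      rw [show ((0 : Nat) : Int) = 0 by simp, PySem.List.pyRange_one_eq_nil le_rfl]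
      simp [mask_nil]
  | succ m ih =>
      rw [show ((m + 1 : Nat) : Int) = ((m : Nat) : Int) + 1 by push_cast; ring,
        PySem.List.pyRange_one_succ_right (by exact_mod_cast Int.natCast_nonneg m),
        List.foldl_append, ih]
      simp only [List.foldl_cons, List.foldl_nil]
      rcases lt_or_ge m d.length with hm | hm
      · rw [scan_on_mask, round_lt d M hM m hm]
        refine Prod.ext ?_ ?_ <;> dsimp only
        · exact copy_update_lt d M m hm
        · have h1 : m - d.length = 0 := by omega
          have h2 : m + 1 - d.length = 0 := by omega
          have hmO : m < (selOrder d).length := by rw [selOrder_length]; omega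
          simp only [h1, h2, List.replicate_zero, List.append_nil]
          rw [List.take_add_one, List.getElem?_eq_getElem hmO]
          simp [List.getElem?_eq_getElem hmO]
      · rw [scan_on_mask, round_ge d M m hm]
        have htk : (selOrder d).take m = selOrder d :=
          List.take_of_length_le (by rw [selOrder_length]; omega)
        have htk1 : (selOrder d).take (m + 1) = selOrder d :=
          List.take_of_length_le (by rw [selOrder_length]; omega)
        rw [htk, htk1]
        refine Prod.ext ?_ ?_ <;> dsimp only
        · exact copy_update_ge d M hd
        · rw [show m + 1 - d.length = (m - d.length) + 1 by omega, List.replicate_succ']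
          simp [List.append_assoc]

theorem final_eq (d : List Int) (kt : Nat) :
    (selOrder d).take kt ++ List.replicate (kt - d.length) (-1)
    = (PySem.List.pyRange 0 ((kt : Nat) : Int) 1).map
        (fun i => if i < ((selOrder d).length : Int) then PySem.List.pyGetD (selOrder d) i (-1) else -1) := by
  have hOlen : (selOrder d).length = d.length := selOrder_length d
  apply List.ext_getElem
  · simp [List.length_take, PySem.List.length_pyRange_one, hOlen]
    omega
  · intro p h1 h2
    have hp : p < kt := by
      simpa [PySem.List.length_pyRange_one] using h2
    rw [List.getElem_map, PySem.List.getElem_pyRange_one]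
    simp only [zero_add]
    by_cases hpn : p < (selOrder d).length
    · rw [if_pos (by exact_mod_cast hpn)]
      rw [PySem.List.pyGetD_natCast, List.getD_eq_getElem _ _ hpn]
      rw [List.getElem_append_left (by simp [List.length_take]; omega), List.getElem_take]
    · rw [if_neg (by push_neg; exact_mod_cast not_lt.mp hpn)]
      push_neg at hpn
      rw [List.getElem_append_right (by simp [List.length_take]; omega)]
      simp

theorem argsort_eq (distances : List Int) (k : Int) (hpre : distances ≠ []) :
    argsort_part distances k = argsort_part_alt distances k := by
  cases hmax : PySem.List.max? distances (fun y => y) with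
  | none => exact absurd ((PySem.List.max?_eq_none_iff _ _).mp hmax) hpre
  | some M =>
      have hM : ∀ y ∈ distances, y ≤ M := by
        intro y hy
        exact PySem.List.max?_isMax hmax y hy
      have hk : PySem.List.pyRange 0 k 1 = PySem.List.pyRange 0 ((k.toNat : Nat) : Int) 1 := by
        rcases (by omega : 0 ≤ k ∨ k < 0) with h | h
        · rw [Int.toNat_of_nonneg h]
        · rw [PySem.List.pyRange_one_eq_nil (le_of_lt h),
            PySem.List.pyRange_one_eq_nil (by simp [Int.toNat_of_nonpos (le_of_lt h)])]
      have hB : argsort_part_alt distances k = (PySem.List.pyRange 0 k 1).map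
          (fun i => if i < ((selOrder distances).length : Int)
            then PySem.List.pyGetD (selOrder distances) i (-1) else -1) := rfl
      rw [hB, hk, ← final_eq]
      simp only [argsort_part, hmax]
      rw [hk, loop_inv distances M hpre hM k.toNat]

-- ===== VERDICT (by name: the statement is the Claim_ definition above) =====
theorem argsort_part_spec : Claim_equal_argsort_part := by
  intro distances k _ hpre
  exact argsort_eq distances k hpre
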